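-- pv_equiv track=rewrite | github.com/andrelr90/administrative_decrees_study | controller.py | multilabel_classify_decrees
-- ===== SOURCE A (Python) =====
-- def multilabel_classify_decrees(decretos, classes):
--     decretos_classify = []
--     for decreto in decretos:
--         referenda = decreto[2]
--         category = []
--
--         for ref in referenda:
--             for i in range(len(classes)):
--                 if ref in classes[i] and i not in category:
--                     category.append(i)
--
--         if(category == []):
--             category.append(len(classes))
--
--         oh_category = []
--         for i in range(len(classes) + 1):
--             if i in category:
--                 oh_category.append(1)
--             else:
--                 oh_category.append(0)
--         dec = (decreto[0], decreto[1], oh_category)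
--         decretos_classify.append(dec)
--     return decretos_classify
-- ===== SOURCE B (Python) =====
-- def multilabel_classify_decrees(decretos, classes):
--     # Inverted index: keyword -> list of class indices containing it (built once),
--     # so classifying a decreto is dict lookups instead of scanning every class.
--     index = {}
--     for i, cls in enumerate(classes):
--         for kw in cls:
--             index.setdefault(kw, []).append(i)
--     result = []
--     for decreto in decretos:
--         hits = set()
--         for ref in decreto[2]:
--             hits.update(index.get(ref, ()))
--         oh = [1 if i in hits else 0 for i in range(len(classes))]
--         oh.append(0 if hits else 1)
--         result.append((decreto[0], decreto[1], oh))
--     return result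
-- ===== Notes on version B (the rewrite author's own statement) =====
-- stated objective: faster
-- what changed: B builds an inverted index (dict keyword -> list of class indices) once, then classifies each decreto by dict lookups accumulated into a hit set, instead of A's per-referendum scan over all classes plus a second one-hot reconstruction pass over an index list.
import Mathlib
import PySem

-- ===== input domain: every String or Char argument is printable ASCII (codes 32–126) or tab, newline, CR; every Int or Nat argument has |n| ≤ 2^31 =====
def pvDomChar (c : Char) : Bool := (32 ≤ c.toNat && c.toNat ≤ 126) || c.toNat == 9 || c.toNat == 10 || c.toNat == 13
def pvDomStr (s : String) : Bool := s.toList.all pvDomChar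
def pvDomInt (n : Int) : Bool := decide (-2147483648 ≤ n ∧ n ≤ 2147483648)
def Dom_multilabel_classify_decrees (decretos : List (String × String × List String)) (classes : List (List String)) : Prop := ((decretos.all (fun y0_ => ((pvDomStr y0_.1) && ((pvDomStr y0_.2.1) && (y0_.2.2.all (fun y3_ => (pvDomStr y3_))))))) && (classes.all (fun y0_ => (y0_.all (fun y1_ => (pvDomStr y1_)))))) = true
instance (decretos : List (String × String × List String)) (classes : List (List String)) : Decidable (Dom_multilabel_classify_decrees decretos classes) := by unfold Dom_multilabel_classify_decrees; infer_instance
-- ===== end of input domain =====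

-- B replaces A's per-referendum scan over every class (plus the category-index list and its
-- second one-hot reconstruction pass) by an inverted index built once — keyword → class
-- indices — queried per referendum into a hit set.

-- ===== PORT A =====
-- inner `for i in range(len(classes))` body of A, for one referendum
def pvCatRef (classes : List (List String)) (ref : String) (cat : List Nat) : List Nat :=
  (List.range classes.length).foldl
    (fun cat i => if ref ∈ classes.getD i [] ∧ i ∉ cat then cat ++ [i] else cat) cat

-- `category` after the `for ref in referenda` loop of A
def pvCat (classes : List (List String)) (referenda : List String) : List Nat :=
  referenda.foldl (fun cat ref => pvCatRef classes ref cat) []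

def multilabel_classify_decrees (decretos : List (String × String × List String)) (classes : List (List String)) : List (String × String × List Int) :=
  decretos.foldl (fun acc decreto =>
    let referenda := decreto.2.2
    let category := pvCat classes referenda
    let category := if category = [] then [classes.length] else category
    let oh_category := (List.range (classes.length + 1)).foldl
      (fun oh i => oh ++ [if i ∈ category then (1 : Int) else 0]) []
    acc ++ [(decreto.1, decreto.2.1, oh_category)]) []

-- ===== PORT B =====
-- the inverted index: `index.setdefault(kw, []).append(i)` is `Dict.modify kw [] (· ++ [i])`
def pvIndex (classes : List (List String)) : PySem.Dict String (List Int) :=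
  (PySem.List.enumerate classes).foldl
    (fun d p => p.2.foldl (fun d kw => d.modify kw [] (· ++ [p.1])) d)
    PySem.Dict.empty

def multilabel_classify_decrees_alt (decretos : List (String × String × List String)) (classes : List (List String)) : List (String × String × List Int) :=
  let index := pvIndex classes
  decretos.foldl (fun acc decreto =>
    let hits : PySem.Set Int :=
      decreto.2.2.foldl (fun s ref => PySem.Set.update s (index.getD ref [])) PySem.Set.empty
    let oh := (PySem.List.pyRange 0 classes.length 1).map
      (fun i => if i ∈ hits then (1 : Int) else 0)
    acc ++ [(decreto.1, decreto.2.1, oh ++ [if hits = [] then (1 : Int) else 0])]) []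

-- ===== PRECONDITION & SPEC =====
def Spec_multilabel_classify_decrees (decretos : List (String × String × List String)) (classes : List (List String)) (out : List (String × String × List Int)) : Prop := out = multilabel_classify_decrees_alt decretos classes
instance (decretos : List (String × String × List String)) (classes : List (List String)) (out : List (String × String × List Int)) : Decidable (Spec_multilabel_classify_decrees decretos classes out) := by unfold Spec_multilabel_classify_decrees; infer_instance

-- ===== CLAIM (what is proved, stated in full; the proofs are below) =====
def Claim_equal_multilabel_classify_decrees : Prop := ∀ (decretos : List (String × String × List String)) (classes : List (List String)), Dom_multilabel_classify_decrees decretos classes → Spec_multilabel_classify_decrees decretos classes (multilabel_classify_decrees decretos classes)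

-- ===== LEMMAS AND PROOFS =====

-- ---- A-side characterisation ----

-- membership after one referendum's scan over class indices 0..n-1
theorem foldl_range_mem (classes : List (List String)) (ref : String) :
    ∀ (n : Nat) (cat : List Nat) (j : Nat),
      j ∈ (List.range n).foldl
            (fun cat i => if ref ∈ classes.getD i [] ∧ i ∉ cat then cat ++ [i] else cat) cat
        ↔ j ∈ cat ∨ (j < n ∧ ref ∈ classes.getD j []) := by
  intro n
  induction n with
  | zero => simp
  | succ n ih =>
    intro cat j
    rw [List.range_succ, List.foldl_append, List.foldl_cons, List.foldl_nil]
    by_cases h : ref ∈ classes.getD n [] ∧ n ∉ (List.range n).foldl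
        (fun cat i => if ref ∈ classes.getD i [] ∧ i ∉ cat then cat ++ [i] else cat) cat
    · rw [if_pos h]
      simp only [List.mem_append, List.mem_singleton, ih]
      constructor
      · rintro ((hc | ⟨hj, hr⟩) | rfl)
        · exact Or.inl hc
        · exact Or.inr ⟨Nat.lt_succ_of_lt hj, hr⟩
        · exact Or.inr ⟨Nat.lt_succ_self _, h.1⟩
      · rintro (hc | ⟨hj, hr⟩)
        · exact Or.inl (Or.inl hc)
        · rcases Nat.lt_succ_iff_lt_or_eq.mp hj with hj2 | rfl
          · exact Or.inl (Or.inr ⟨hj2, hr⟩)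
          · exact Or.inr rfl
    · rw [if_neg h]
      rw [ih]
      constructor
      · rintro (hc | ⟨hj, hr⟩)
        · exact Or.inl hc
        · exact Or.inr ⟨Nat.lt_succ_of_lt hj, hr⟩
      · rintro (hc | ⟨hj, hr⟩)
        · exact Or.inl hc
        · rcases Nat.lt_succ_iff_lt_or_eq.mp hj with hj2 | rfl
          · exact Or.inr ⟨hj2, hr⟩
          · by_cases hm : j ∈ (List.range j).foldl
                (fun cat i => if ref ∈ classes.getD i [] ∧ i ∉ cat then cat ++ [i] else cat) cat
            · rw [ih] at hm
              rcases hm with hc | ⟨hj3, _⟩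
              · exact Or.inl hc
              · omega
            · exact absurd ⟨hr, hm⟩ h

-- membership after one referendum's full scan
theorem mem_pvCatRef (classes : List (List String)) (ref : String) (cat : List Nat) (j : Nat) :
    j ∈ pvCatRef classes ref cat ↔
      j ∈ cat ∨ (j < classes.length ∧ ref ∈ classes.getD j []) := by
  unfold pvCatRef
  exact foldl_range_mem classes ref classes.length cat j

-- membership in A's final category list
theorem mem_pvCat (classes : List (List String)) (referenda : List String) (j : Nat) :
    j ∈ pvCat classes referenda ↔
      j < classes.length ∧ ∃ r ∈ referenda, r ∈ classes.getD j [] := by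
  unfold pvCat
  have gen : ∀ (refs : List String) (cat : List Nat),
      j ∈ refs.foldl (fun cat ref => pvCatRef classes ref cat) cat ↔
        j ∈ cat ∨ (j < classes.length ∧ ∃ r ∈ refs, r ∈ classes.getD j []) := by
    intro refs
    induction refs with
    | nil => simp
    | cons r rs ih =>
      intro cat
      simp only [List.foldl_cons, ih, mem_pvCatRef, List.mem_cons]
      constructor
      · rintro ((hc | ⟨hj, hr⟩) | ⟨hj, x, hx, hxm⟩)
        · exact Or.inl hc
        · exact Or.inr ⟨hj, r, Or.inl rfl, hr⟩
        · exact Or.inr ⟨hj, x, Or.inr hx, hxm⟩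
      · rintro (hc | ⟨hj, x, (rfl | hx), hxm⟩)
        · exact Or.inl (Or.inl hc)
        · exact Or.inl (Or.inr ⟨hj, hxm⟩)
        · exact Or.inr ⟨hj, x, hx, hxm⟩
  simp [gen]

-- ---- B-side characterisation ----

-- the keyword/index pairs the nested index-building loop processes, flattened
def pvPairs (classes : List (List String)) : List (String × Int) :=
  (PySem.List.enumerate classes).flatMap (fun p => p.2.map (fun kw => (kw, p.1)))

-- the nested build loop is the flat fold over pvPairs
theorem pvIndex_eq_flat (classes : List (List String)) :
    pvIndex classes =
      (pvPairs classes).foldl (fun d q => d.modify q.1 [] (· ++ [q.2])) PySem.Dict.empty := by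
  unfold pvIndex pvPairs
  generalize PySem.List.enumerate classes = l
  have gen : ∀ (l : List (Int × List String)) (d : PySem.Dict String (List Int)),
      l.foldl (fun d p => p.2.foldl (fun d kw => d.modify kw [] (· ++ [p.1])) d) d
        = (l.flatMap (fun p => p.2.map (fun kw => (kw, p.1)))).foldl
            (fun d q => d.modify q.1 [] (· ++ [q.2])) d := by
    intro l
    induction l with
    | nil => simp
    | cons p ps ih =>
      intro d
      rw [List.foldl_cons, List.flatMap_cons, List.foldl_append, ih]
      congr 1
      rw [List.foldl_map]
  exact gen l PySem.Dict.empty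

-- membership in an index entry: exactly the classes that contain the keyword
theorem mem_pvIndex (classes : List (List String)) (kw : String) (i : Int) :
    i ∈ (pvIndex classes).getD kw [] ↔
      ∃ k : Nat, k < classes.length ∧ i = (k : Int) ∧ kw ∈ classes.getD k [] := by
  rw [pvIndex_eq_flat, PySem.Dict.getD_foldl_modify_append, PySem.Dict.getD_empty,
    List.nil_append]
  simp only [List.mem_map, List.mem_filter, pvPairs, List.mem_flatMap,
    PySem.List.mem_enumerate_iff]
  constructor
  · rintro ⟨q, ⟨⟨p, ⟨k, hk, rfl⟩, hq⟩, hkw⟩, rfl⟩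
    obtain ⟨kw', hkw', rfl⟩ := hq
    have : kw' = kw := by simpa using hkw
    subst this
    exact ⟨k, hk, by simp, by rw [List.getD_eq_getElem _ _ hk]; exact hkw'⟩
  · rintro ⟨k, hk, rfl, hkw⟩
    refine ⟨(kw, (k : Int)), ⟨⟨((k : Int), classes[k]), ⟨k, hk, by simp⟩, ?_⟩, by simp⟩, rfl⟩
    exact ⟨kw, by rw [List.getD_eq_getElem _ _ hk] at hkw; exact hkw, rfl⟩

-- membership in the hit set accumulated over the referenda
theorem mem_hits (index : PySem.Dict String (List Int)) (referenda : List String) (i : Int) :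
    i ∈ referenda.foldl (fun s ref => PySem.Set.update s (index.getD ref [])) PySem.Set.empty ↔
      ∃ r ∈ referenda, i ∈ index.getD r [] := by
  have gen : ∀ (refs : List String) (s : PySem.Set Int),
      i ∈ refs.foldl (fun s ref => PySem.Set.update s (index.getD ref [])) s ↔
        i ∈ s ∨ ∃ r ∈ refs, i ∈ index.getD r [] := by
    intro refs
    induction refs with
    | nil => simp
    | cons r rs ih =>
      intro s
      simp only [List.foldl_cons, ih, PySem.Set.mem_update, List.mem_cons]
      constructor
      · rintro ((hs | hr) | ⟨x, hx, hxm⟩)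
        · exact Or.inl hs
        · exact Or.inr ⟨r, Or.inl rfl, hr⟩
        · exact Or.inr ⟨x, Or.inr hx, hxm⟩
      · rintro (hs | ⟨x, (rfl | hx), hxm⟩)
        · exact Or.inl (Or.inl hs)
        · exact Or.inl (Or.inr hxm)
        · exact Or.inr ⟨x, hx, hxm⟩
  simp [gen]

-- (i : Int) is a hit iff the Nat index i is in A's category list
theorem hits_iff_cat (classes : List (List String)) (referenda : List String) (j : Nat) :
    ((j : Int) ∈ referenda.foldl
        (fun s ref => PySem.Set.update s ((pvIndex classes).getD ref [])) PySem.Set.empty) ↔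
      j ∈ pvCat classes referenda := by
  rw [mem_hits, mem_pvCat]
  constructor
  · rintro ⟨r, hr, hm⟩
    rw [mem_pvIndex] at hm
    obtain ⟨k, hk, hkj, hkw⟩ := hm
    have : k = j := by omega
    subst this
    exact ⟨hk, r, hr, hkw⟩
  · rintro ⟨hj, r, hr, hm⟩
    exact ⟨r, hr, (mem_pvIndex classes r _).mpr ⟨j, hj, rfl, hm⟩⟩

-- the hit set is empty iff A's category list is empty
theorem hits_empty_iff (classes : List (List String)) (referenda : List String) :
    (referenda.foldl
        (fun s ref => PySem.Set.update s ((pvIndex classes).getD ref [])) PySem.Set.empty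
      = ([] : List Int)) ↔ pvCat classes referenda = [] := by
  constructor
  · intro h
    by_contra hne
    obtain ⟨j, js, hj⟩ := List.ne_nil_iff_exists_cons.mp hne
    have hjm : j ∈ pvCat classes referenda := by rw [hj]; exact List.mem_cons_self
    have := (hits_iff_cat classes referenda j).mpr hjm
    rw [h] at this
    exact List.not_mem_nil this
  · intro h
    by_contra hne
    obtain ⟨i, is, hi⟩ := List.ne_nil_iff_exists_cons.mp hne
    have him : i ∈ referenda.foldl
        (fun s ref => PySem.Set.update s ((pvIndex classes).getD ref [])) PySem.Set.empty := by
      rw [hi]; exact List.mem_cons_self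
    rw [mem_hits] at him
    obtain ⟨r, hr, hm⟩ := him
    rw [mem_pvIndex] at hm
    obtain ⟨k, hk, rfl, hkw⟩ := hm
    have : k ∈ pvCat classes referenda := (mem_pvCat classes referenda k).mpr ⟨hk, r, hr, hkw⟩
    rw [h] at this
    exact List.not_mem_nil this

-- per-decreto: A's one-hot vector equals B's
theorem oh_eq (classes : List (List String)) (referenda : List String) :
    (List.range (classes.length + 1)).foldl
        (fun oh i => oh ++ [if i ∈ (if pvCat classes referenda = [] then [classes.length]
                                     else pvCat classes referenda) then (1 : Int) else 0]) []
      = (PySem.List.pyRange 0 classes.length 1).map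
          (fun i => if i ∈ referenda.foldl
              (fun s ref => PySem.Set.update s ((pvIndex classes).getD ref []))
              PySem.Set.empty then (1 : Int) else 0) ++
        [if referenda.foldl
            (fun s ref => PySem.Set.update s ((pvIndex classes).getD ref []))
            PySem.Set.empty = [] then (1 : Int) else 0] := by
  rw [PySem.List.foldl_append_singleton_eq_map, List.nil_append, List.range_succ,
    List.map_append, List.map_singleton]
  congr 1
  · -- the classes.length class bits
    rw [PySem.List.pyRange_one, List.map_map]
    have hn : ((classes.length : Int) - 0).toNat = classes.length := by omega
    rw [hn]
    apply List.map_congr_left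
    intro k hk
    rw [List.mem_range] at hk
    simp only [Function.comp, zero_add]
    by_cases hne : pvCat classes referenda = []
    · have hB : ¬ ((k : Int) ∈ referenda.foldl
          (fun s ref => PySem.Set.update s ((pvIndex classes).getD ref []))
          PySem.Set.empty) := by
        rw [hits_iff_cat, hne]
        exact List.not_mem_nil
      have hkA : k ∉ (if pvCat classes referenda = [] then [classes.length]
          else pvCat classes referenda) := by
        rw [if_pos hne]; simp; omega
      rw [if_neg hkA, if_neg hB]
    · rw [if_neg hne]
      by_cases hc : k ∈ pvCat classes referenda
      · rw [if_pos hc, if_pos ((hits_iff_cat classes referenda k).mpr hc)]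
      · rw [if_neg hc, if_neg (fun ha => hc ((hits_iff_cat classes referenda k).mp ha))]
  · -- the fallback bit
    by_cases hne : pvCat classes referenda = []
    · have hA : classes.length ∈ (if pvCat classes referenda = [] then [classes.length]
          else pvCat classes referenda) := by rw [if_pos hne]; simp
      rw [if_pos hA, if_pos ((hits_empty_iff classes referenda).mpr hne)]
    · have hA : classes.length ∉ (if pvCat classes referenda = [] then [classes.length]
          else pvCat classes referenda) := by
        rw [if_neg hne]
        intro h
        have := ((mem_pvCat classes referenda _).mp h).1
        omega
      rw [if_neg hA, if_neg (fun h => hne ((hits_empty_iff classes referenda).mp h))]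

-- ===== VERDICT (by name: the statement is the Claim_ definition above) =====
theorem multilabel_classify_decrees_spec : Claim_equal_multilabel_classify_decrees := by
  intro decretos classes _
  unfold Spec_multilabel_classify_decrees multilabel_classify_decrees multilabel_classify_decrees_alt
  rw [PySem.List.foldl_append_singleton_eq_map, PySem.List.foldl_append_singleton_eq_map,
    List.nil_append, List.nil_append]
  apply List.map_congr_left
  intro d _
  dsimp only
  rw [oh_eq classes d.2.2]
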